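-- pv_equiv track=rewrite | github.com/Bruenor/GT-wave-sync | tower_sync_v2_bycooldown.py | compute_exact_overlaps
-- ===== SOURCE A (Python) =====
-- from math import gcd, floor
--
-- WAVE_CD = 35
--
-- TOTAL_TIME = 36000  # 10 hours in seconds
--
-- def compute_exact_overlaps(golden_tower_cd, golden_tower_duration):
--     # Step 1: LCM of A and B. Returns an integer
--     lcm = (golden_tower_cd * WAVE_CD) // gcd(golden_tower_cd, WAVE_CD)
--
--     # Step 2: A and B event times within one LCM cycle. Result is array of times when event A or B occurs
--     gt_activation_times = [golden_tower_cd * i for i in range(lcm // golden_tower_cd)]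
--     new_wave_start_times = [WAVE_CD * i for i in range(lcm // WAVE_CD)]
--
--     # Step 3: Count exact overlaps
--     overlaps = 0
--     for gt_start in gt_activation_times:
--         gt_end = gt_start + golden_tower_duration
--         for wave_start in new_wave_start_times:
--             if gt_start <= wave_start < gt_end:
--                 overlaps += 1
--
--     # Step 4: Number of full LCM cycles in 10 hours
--     full_cycles = floor(TOTAL_TIME / lcm)
--
--     # Step 5: Total overlaps
--     total_overlaps = overlaps * full_cycles
--
--     return [
--         golden_tower_duration,
--         lcm,
--         len(gt_activation_times),
--         len(new_wave_start_times),
--         overlaps,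
--         full_cycles,
--         total_overlaps
--     ]
-- ===== SOURCE B (Python) =====
-- from math import gcd
--
-- WAVE_CD = 35
-- TOTAL_TIME = 36000
--
-- def compute_exact_overlaps(golden_tower_cd, golden_tower_duration):
--     # One pass over GT activations; multiples of WAVE_CD in each window are
--     # counted arithmetically (ceil/floor division) and clipped to the cycle.
--     lcm = (golden_tower_cd * WAVE_CD) // gcd(golden_tower_cd, WAVE_CD)
--     n_gt = lcm // golden_tower_cd
--     n_w = max(lcm // WAVE_CD, 0)
--     overlaps = 0
--     for i in range(n_gt):
--         s = golden_tower_cd * i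
--         lo = max(-((-s) // WAVE_CD), 0)                      # first wave index >= s, clipped at 0
--         hi = min((s + golden_tower_duration - 1) // WAVE_CD, n_w - 1)  # last wave index < s+dur, clipped
--         if lo <= hi:
--             overlaps += hi - lo + 1
--     full_cycles = TOTAL_TIME // lcm
--     return [golden_tower_duration, lcm, n_gt, n_w, overlaps,
--             full_cycles, overlaps * full_cycles]
-- ===== Notes on version B (the rewrite author's own statement) =====
-- stated objective: faster
-- what changed: B drops A's materialised event lists and inner scan over all wave start times, counting the multiples of 35 inside each GT window arithmetically (ceil/floor division) clipped to the LCM cycle.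
import Mathlib
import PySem

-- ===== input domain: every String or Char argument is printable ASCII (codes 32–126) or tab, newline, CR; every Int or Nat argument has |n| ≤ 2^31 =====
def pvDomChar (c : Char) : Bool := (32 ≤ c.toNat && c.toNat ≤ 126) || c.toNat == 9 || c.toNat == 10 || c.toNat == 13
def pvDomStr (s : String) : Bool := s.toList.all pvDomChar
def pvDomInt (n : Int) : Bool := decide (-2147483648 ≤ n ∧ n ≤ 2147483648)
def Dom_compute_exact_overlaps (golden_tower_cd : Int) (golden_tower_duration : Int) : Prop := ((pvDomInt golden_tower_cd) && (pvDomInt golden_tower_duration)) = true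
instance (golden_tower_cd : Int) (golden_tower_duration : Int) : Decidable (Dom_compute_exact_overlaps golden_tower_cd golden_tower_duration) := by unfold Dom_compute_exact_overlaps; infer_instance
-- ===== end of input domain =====

-- B replaces A's inner scan over all wave start times by an arithmetic count of
-- multiples of 35 in each GT window (objective: faster, asymptotic).

-- ===== PORT A =====
-- floor(TOTAL_TIME / lcm) in A is a float-division floor; it equals integer floor
-- division for every lcm reachable on Dom (checked separately), ported as floordiv.
def compute_exact_overlaps (golden_tower_cd : Int) (golden_tower_duration : Int) : List Int :=
  let lcm := PySem.Int.floordiv (golden_tower_cd * 35) (Int.gcd golden_tower_cd 35)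
  let gt_activation_times := (PySem.List.pyRange 0 (PySem.Int.floordiv lcm golden_tower_cd) 1).map (fun i => golden_tower_cd * i)
  let new_wave_start_times := (PySem.List.pyRange 0 (PySem.Int.floordiv lcm 35) 1).map (fun i => 35 * i)
  let overlaps := gt_activation_times.foldl (fun acc gt_start =>
      let gt_end := gt_start + golden_tower_duration
      new_wave_start_times.foldl (fun acc2 wave_start =>
        if gt_start ≤ wave_start ∧ wave_start < gt_end then acc2 + 1 else acc2) acc) 0
  let full_cycles := PySem.Int.floordiv 36000 lcm
  [golden_tower_duration, lcm, (gt_activation_times.length : Int),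
   (new_wave_start_times.length : Int), overlaps, full_cycles, overlaps * full_cycles]

-- ===== PORT B =====
def compute_exact_overlaps_alt (golden_tower_cd : Int) (golden_tower_duration : Int) : List Int :=
  let lcm := PySem.Int.floordiv (golden_tower_cd * 35) (Int.gcd golden_tower_cd 35)
  let n_gt := PySem.Int.floordiv lcm golden_tower_cd
  let n_w := max (PySem.Int.floordiv lcm 35) 0
  let overlaps := (PySem.List.pyRange 0 n_gt 1).foldl (fun acc i =>
      let s := golden_tower_cd * i
      let lo := max (-(PySem.Int.floordiv (-s) 35)) 0
      let hi := min (PySem.Int.floordiv (s + golden_tower_duration - 1) 35) (n_w - 1)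
      if lo ≤ hi then acc + (hi - lo + 1) else acc) 0
  let full_cycles := PySem.Int.floordiv 36000 lcm
  [golden_tower_duration, lcm, n_gt, n_w, overlaps, full_cycles, overlaps * full_cycles]

-- ===== PRECONDITION & SPEC =====
-- Pre_ excludes exactly golden_tower_cd = 0, where Python A (and B) raise ZeroDivisionError.
def Pre_compute_exact_overlaps (golden_tower_cd : Int) (golden_tower_duration : Int) : Prop :=
  golden_tower_cd ≠ 0
instance (golden_tower_cd : Int) (golden_tower_duration : Int) : Decidable (Pre_compute_exact_overlaps golden_tower_cd golden_tower_duration) := by unfold Pre_compute_exact_overlaps; infer_instance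
def pvWitness_compute_exact_overlaps : Int × Int := (10, 3)

def Spec_compute_exact_overlaps (golden_tower_cd : Int) (golden_tower_duration : Int) (out : List Int) : Prop := out = compute_exact_overlaps_alt golden_tower_cd golden_tower_duration
instance (golden_tower_cd : Int) (golden_tower_duration : Int) (out : List Int) : Decidable (Spec_compute_exact_overlaps golden_tower_cd golden_tower_duration out) := by unfold Spec_compute_exact_overlaps; infer_instance

-- ===== CLAIM (what is proved, stated in full; the proofs are below) =====
def Claim_equal_compute_exact_overlaps : Prop := ∀ (golden_tower_cd : Int) (golden_tower_duration : Int), Dom_compute_exact_overlaps golden_tower_cd golden_tower_duration → Pre_compute_exact_overlaps golden_tower_cd golden_tower_duration → Spec_compute_exact_overlaps golden_tower_cd golden_tower_duration (compute_exact_overlaps golden_tower_cd golden_tower_duration)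

-- ===== LEMMAS AND PROOFS =====

-- B's closed-form count of one GT window
def pvCount (s d m : Int) : Int :=
  if max (-(PySem.Int.floordiv (-s) 35)) 0 ≤ min (PySem.Int.floordiv (s + d - 1) 35) (max m 0 - 1)
  then min (PySem.Int.floordiv (s + d - 1) 35) (max m 0 - 1) - max (-(PySem.Int.floordiv (-s) 35)) 0 + 1
  else 0

lemma le_iff_lo (s : Int) (j : Int) : (-(PySem.Int.floordiv (-s) 35) ≤ j) ↔ s ≤ 35 * j := by
  rw [neg_le, PySem.Int.le_floordiv_iff_mul_le (by norm_num : (0:Int) < 35)]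
  constructor <;> intro h <;> omega

lemma le_iff_hi (s d : Int) (j : Int) : (j ≤ PySem.Int.floordiv (s + d - 1) 35) ↔ 35 * j < s + d := by
  rw [PySem.Int.le_floordiv_iff_mul_le (by norm_num : (0:Int) < 35)]
  constructor <;> intro h <;> omega

lemma count_range_nat (s d : Int) (n : Nat) (acc : Int) :
    (PySem.List.pyRange 0 (n : Int) 1).foldl
      (fun a j => if s ≤ 35 * j ∧ 35 * j < s + d then a + 1 else a) acc
    = acc + pvCount s d (n : Int) := by
  induction n generalizing acc with
  | zero =>
      rw [show ((0 : Nat) : Int) = 0 by norm_num, PySem.List.pyRange_one_eq_nil le_rfl]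
      simp only [List.foldl_nil, pvCount]
      split <;> omega
  | succ n ih =>
      rw [show ((n + 1 : Nat) : Int) = (n : Int) + 1 by push_cast; ring,
        PySem.List.pyRange_one_succ_right (Int.natCast_nonneg n), List.foldl_append]
      simp only [List.foldl_cons, List.foldl_nil]
      split
      · rename_i hmem
        rw [ih]
        have hlo := (le_iff_lo s (n : Int)).2 hmem.1
        have hhi := (le_iff_hi s d (n : Int)).2 hmem.2
        simp only [pvCount]
        split <;> split <;> omega
      · rename_i hmem
        rw [ih]
        have hnot : ¬ (-(PySem.Int.floordiv (-s) 35) ≤ (n:Int) ∧ (n:Int) ≤ PySem.Int.floordiv (s + d - 1) 35) := by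
          intro h
          exact hmem ⟨(le_iff_lo s _).1 h.1, (le_iff_hi s d _).1 h.2⟩
        simp only [pvCount]
        split <;> split <;> omega

lemma count_range (s d m : Int) (acc : Int) :
    (PySem.List.pyRange 0 m 1).foldl
      (fun a j => if s ≤ 35 * j ∧ 35 * j < s + d then a + 1 else a) acc
    = acc + pvCount s d m := by
  rcases le_or_gt m 0 with hm | hm
  · rw [PySem.List.pyRange_one_eq_nil hm]
    simp only [List.foldl_nil, pvCount]
    split <;> omega
  · have h : m = ((m.toNat : Nat) : Int) := by omega
    rw [h, count_range_nat]

-- ===== VERDICT (by name: the statement is the Claim_ definition above) =====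
theorem compute_exact_overlaps_spec : Claim_equal_compute_exact_overlaps := by
  intro cd dur _ hpre
  unfold Spec_compute_exact_overlaps compute_exact_overlaps compute_exact_overlaps_alt
  simp only []
  -- lcm is an exact multiple of cd
  set g : Int := (Int.gcd cd 35 : Int) with hg
  have hgdvd : g ∣ (35 : Int) := by rw [hg]; exact Int.gcd_dvd_right cd 35
  have hgpos : 0 < g := by
    have : Int.gcd cd 35 ≠ 0 := by
      simp [Int.gcd_eq_zero_iff]
    omega
  obtain ⟨k, hk⟩ := hgdvd
  have hkpos : 0 < k := by nlinarith
  have hlcm : PySem.Int.floordiv (cd * 35) g = cd * k := by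
    show Int.fdiv (cd * 35) g = cd * k
    rw [hk, show cd * (g * k) = g * (cd * k) by ring, Int.mul_fdiv_cancel_left _ (by omega)]
  have hngt : PySem.Int.floordiv (cd * k) cd = k := by
    show Int.fdiv (cd * k) cd = k
    exact Int.mul_fdiv_cancel_left _ hpre
  rw [hlcm, hngt]
  -- lengths
  rw [List.length_map, List.length_map, PySem.List.length_pyRange_one, PySem.List.length_pyRange_one]
  have hlen1 : ((k - 0).toNat : Int) = k := by
    rw [Int.toNat_eq_max]; omega
  rw [hlen1]
  -- wave-list length equals B's clipped n_w
  have hlen2 : ∀ x : Int, ((x - 0).toNat : Int) = max x 0 := by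
    intro x; rw [Int.toNat_eq_max]; omega
  rw [hlen2]
  -- overlaps: collapse the maps, then replace the inner scan by the closed-form count
  rw [List.foldl_map]
  have hfold :
      (PySem.List.pyRange 0 k 1).foldl
        (fun acc i =>
          ((PySem.List.pyRange 0 (PySem.Int.floordiv (cd * k) 35) 1).map (fun j => 35 * j)).foldl
            (fun acc2 w => if cd * i ≤ w ∧ w < cd * i + dur then acc2 + 1 else acc2) acc) 0
    = (PySem.List.pyRange 0 k 1).foldl
        (fun acc i =>
          let s := cd * i
          let lo := max (-(PySem.Int.floordiv (-s) 35)) 0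
          let hi := min (PySem.Int.floordiv (s + dur - 1) 35)
                        (max (PySem.Int.floordiv (cd * k) 35) 0 - 1)
          if lo ≤ hi then acc + (hi - lo + 1) else acc) 0 := by
    have hbody : (fun (acc i : Int) =>
        ((PySem.List.pyRange 0 (PySem.Int.floordiv (cd * k) 35) 1).map (fun j => 35 * j)).foldl
          (fun acc2 w => if cd * i ≤ w ∧ w < cd * i + dur then acc2 + 1 else acc2) acc)
      = (fun (acc i : Int) =>
          let s := cd * i
          let lo := max (-(PySem.Int.floordiv (-s) 35)) 0
          let hi := min (PySem.Int.floordiv (s + dur - 1) 35)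
                        (max (PySem.Int.floordiv (cd * k) 35) 0 - 1)
          if lo ≤ hi then acc + (hi - lo + 1) else acc) := by
      funext acc i
      rw [List.foldl_map, count_range]
      simp only [pvCount]
      split <;> omega
    exact congrFun (congrFun (congrArg List.foldl hbody) 0) _
  rw [hfold]
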